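-- pv_equiv track=rewrite | github.com/aorursy/new-nb-2 | davidmsc_exploration.py | tokenizer_fit
-- ===== SOURCE A (Python) =====
-- import string
--
-- def tokenizer_fit(sentences, vocabulary):
--
--     '''
--
--     Inputs:
--
--     sentences: series object
--
--     vocabulary: dictionary with words as keys
--
--
--
--     Output:
--
--     word_index: dictionary with words as keys and tokens as columns
--
--     '''
--
--     word_index = {}
--
--     token = 1
--
--
--
--     for i in range(len(sentences)):
--
--
--
--         sentence = sentences[i]
--
--
--
--         ## Sepearate punctuation
--
--         chs = string.punctuation
--
--
--
--         for ch in chs: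
--
--             idx = sentence.find(ch)
--
--
--
--             if idx != -1:
--
--                 sentence = sentence.replace(ch, " " + ch)
--
--
--
--         ## Split into characters
--
--         sentence = sentence.split(' ')
--
--
--
--         for word in sentence:
--
--             if word not in word_index:
--
--                 word_index[word] = token
--
--                 token += 1
--
--
--
--     return word_index
-- ===== SOURCE B (Python) =====
-- import string
--
-- def tokenizer_fit(sentences, vocabulary):
--     punct = set(string.punctuation)
--     words = []
--     for sentence in sentences:
--         out = []
--         for ch in sentence:
--             if ch in punct:
--                 out.append(' ')
--             out.append(ch)
--         words.extend(''.join(out).split(' '))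
--     return {w: i + 1 for i, w in enumerate(dict.fromkeys(words))}
-- ===== Notes on version B (the rewrite author's own statement) =====
-- stated objective: faster
-- what changed: B separates punctuation in one left-to-right character pass with a membership set instead of A's 32 find/replace scans per sentence, and builds the token dict by ordered dedup + enumerate instead of an incremental counter.
import Mathlib
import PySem

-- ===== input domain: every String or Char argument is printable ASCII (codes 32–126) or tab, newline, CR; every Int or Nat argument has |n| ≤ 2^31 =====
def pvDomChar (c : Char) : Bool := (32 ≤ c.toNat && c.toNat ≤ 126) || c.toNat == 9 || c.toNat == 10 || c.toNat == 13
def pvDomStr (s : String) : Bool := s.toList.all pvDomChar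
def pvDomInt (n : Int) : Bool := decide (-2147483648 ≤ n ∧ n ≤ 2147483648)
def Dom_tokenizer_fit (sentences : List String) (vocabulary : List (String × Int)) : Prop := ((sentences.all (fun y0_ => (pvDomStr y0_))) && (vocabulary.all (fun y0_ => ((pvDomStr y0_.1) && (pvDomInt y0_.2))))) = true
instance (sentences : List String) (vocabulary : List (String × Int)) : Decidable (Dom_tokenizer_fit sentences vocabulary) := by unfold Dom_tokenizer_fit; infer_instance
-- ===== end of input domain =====

-- B replaces A's 32 find/replace scans per sentence by one character pass, and the
-- incremental token-counter dict by dedup-then-enumerate (objective: faster, constant factor).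

-- ===== PORT A =====
-- string.punctuation
def pvPunct : List Char := "!\"#$%&'()*+,-./:;<=>?@[\\]^_`{|}~".toList

def tokenizer_fit (sentences : List String) (vocabulary : List (String × Int)) : List (String × Int) :=
  -- word_index = {}; token = 1  (state pair)
  let st := (PySem.List.pyRange 0 (PySem.List.len sentences)).foldl
    (fun (st : PySem.Dict String Int × Int) i =>
      let sentence := PySem.List.pyGetD sentences i ""     -- always in range
      let chs := pvPunct
      -- for ch in chs: idx = sentence.find(ch); if idx != -1: sentence = sentence.replace(ch, " " + ch)
      let t := chs.foldl (fun t ch =>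
          let idx := PySem.Chars.find t [ch]
          if idx ≠ -1 then PySem.Chars.replace t [ch] [' ', ch] else t) sentence.toList
      -- sentence = sentence.split(' ')
      let ws := (PySem.Chars.splitOn t [' ']).map String.mk
      ws.foldl (fun (st : PySem.Dict String Int × Int) w =>
          if st.1.contains w then st else (st.1.insert w st.2, st.2 + 1)) st)
    (PySem.Dict.empty, 1)
  st.1.items

-- ===== PORT B =====
-- punct = set(string.punctuation)
def pvPunctSet : PySem.Set Char := PySem.Set.ofList "!\"#$%&'()*+,-./:;<=>?@[\\]^_`{|}~".toList

def tokenizer_fit_alt (sentences : List String) (vocabulary : List (String × Int)) : List (String × Int) :=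
  -- words = []; for sentence in sentences: one char pass, then words.extend(out.split(' '))
  let words := sentences.foldl (fun ws s =>
      ws ++ (PySem.Chars.splitOn
              (s.toList.flatMap (fun ch => if pvPunctSet.contains ch then [' ', ch] else [ch]))
              [' ']).map String.mk) []
  -- {w: i + 1 for i, w in enumerate(dict.fromkeys(words))}
  (PySem.List.enumerate (PySem.List.dedup words)).map (fun p => (p.2, p.1 + 1))

-- ===== PRECONDITION & SPEC =====
def Spec_tokenizer_fit (sentences : List String) (vocabulary : List (String × Int)) (out : List (String × Int)) : Prop := out = tokenizer_fit_alt sentences vocabulary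
instance (sentences : List String) (vocabulary : List (String × Int)) (out : List (String × Int)) : Decidable (Spec_tokenizer_fit sentences vocabulary out) := by unfold Spec_tokenizer_fit; infer_instance

-- ===== CLAIM (what is proved, stated in full; the proofs are below) =====
def Claim_equal_tokenizer_fit : Prop := ∀ (sentences : List String) (vocabulary : List (String × Int)), Dom_tokenizer_fit sentences vocabulary → Spec_tokenizer_fit sentences vocabulary (tokenizer_fit sentences vocabulary)

-- ===== LEMMAS AND PROOFS =====

-- replace with a single-character pattern is a flatMap over the characters
theorem pv_replace_go_single (c : Char) (new : List Char) :
    ∀ (fuel : Nat) (t acc : List Char), t.length ≤ fuel →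
      PySem.Chars.replace.go [c] new fuel t acc
        = acc.reverse ++ t.flatMap (fun x => if x = c then new else [x]) := by
  intro fuel
  induction fuel with
  | zero =>
    intro t acc h
    have : t = [] := List.length_eq_zero_iff.mp (Nat.le_zero.mp h)
    subst this; simp [PySem.Chars.replace.go]
  | succ n ih =>
    intro t acc h
    cases t with
    | nil => simp [PySem.Chars.replace.go]
    | cons x rest =>
      simp only [PySem.Chars.replace.go, List.isPrefixOf]
      by_cases hx : x = c
      · subst hx
        simp only [beq_self_eq_true, Bool.true_and, if_pos, List.length_cons, List.length_nil,
          List.drop_succ_cons, List.drop_zero]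
        rw [ih rest _ (by simpa using h)]
        simp
      · have hbe : (c == x) = false := beq_eq_false_iff_ne.mpr (Ne.symm hx)
        simp only [hbe, Bool.false_and, Bool.false_eq_true, if_false]
        rw [ih rest _ (by simpa using h)]
        simp [hx]

theorem pv_replace_single (c : Char) (new t : List Char) :
    PySem.Chars.replace t [c] new = t.flatMap (fun x => if x = c then new else [x]) := by
  rw [PySem.Chars.replace]
  simp only [List.isEmpty_cons, Bool.false_eq_true, if_neg, not_false_iff]
  simpa using pv_replace_go_single c new t.length t [] le_rfl

theorem pv_singleton_infix {a : Char} {l : List Char} : [a] <:+: l ↔ a ∈ l := by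
  constructor
  · intro h; exact h.mem (by simp)
  · intro h; obtain ⟨s, t, rfl⟩ := List.append_of_mem h; exact ⟨s, t, by simp⟩

theorem pv_flatMap_id_of_notMem {c : Char} {t : List Char} (new : List Char) (h : c ∉ t) :
    t.flatMap (fun x => if x = c then new else [x]) = t := by
  induction t with
  | nil => simp
  | cons x rest ih =>
    have hx : x ≠ c := fun hc => h (hc ▸ List.mem_cons_self)
    simp only [List.flatMap_cons, if_neg hx]
    rw [ih (fun hm => h (List.mem_cons_of_mem _ hm))]
    simp

-- one iteration of A's punctuation loop, guard included, as a flatMap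
theorem pv_step_eq_flatMap (t : List Char) (c : Char) :
    (if PySem.Chars.find t [c] ≠ -1 then PySem.Chars.replace t [c] [' ', c] else t)
      = t.flatMap (fun x => if x = c then [' ', c] else [x]) := by
  by_cases h : PySem.Chars.find t [c] = -1
  · have hmem : c ∉ t := fun hm =>
      ((PySem.Chars.find_eq_neg_one_iff t [c]).mp h) (pv_singleton_infix.mpr hm)
    simp [h, pv_flatMap_id_of_notMem _ hmem]
  · simp [h, pv_replace_single]

def pvExpand (P s : List Char) : List Char :=
  s.flatMap (fun c => if P.contains c then [' ', c] else [c])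

theorem pv_expand_nil (s : List Char) : pvExpand [] s = s := by
  simp [pvExpand]

-- invariant of A's punctuation fold
theorem pv_fold_expand :
    ∀ (ps P s : List Char), ps.Nodup → ' ' ∉ ps → (∀ c ∈ ps, c ∉ P) →
      ps.foldl (fun t ch =>
          let idx := PySem.Chars.find t [ch]
          if idx ≠ -1 then PySem.Chars.replace t [ch] [' ', ch] else t) (pvExpand P s)
        = pvExpand (P ++ ps) s := by
  intro ps
  induction ps with
  | nil => intro P s _ _ _; simp
  | cons ch rest ih =>
    intro P s hnd hsp hP
    have hchP : ch ∉ P := hP ch List.mem_cons_self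
    have hchsp : ch ≠ ' ' := fun h => hsp (h ▸ List.mem_cons_self)
    simp only [List.foldl_cons]
    have hstep : (let idx := PySem.Chars.find (pvExpand P s) [ch]
        if idx ≠ -1 then PySem.Chars.replace (pvExpand P s) [ch] [' ', ch] else pvExpand P s)
        = pvExpand (P ++ [ch]) s := by
      show (if PySem.Chars.find (pvExpand P s) [ch] ≠ -1 then
              PySem.Chars.replace (pvExpand P s) [ch] [' ', ch] else pvExpand P s)
            = pvExpand (P ++ [ch]) s
      rw [pv_step_eq_flatMap, pvExpand, pvExpand, List.flatMap_assoc]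
      apply List.flatMap_congr
      intro c _
      by_cases hcP : c ∈ P
      · have h1 : c ≠ ch := fun h => hchP (h ▸ hcP)
        simp [hcP, h1, hchsp.symm]
      · by_cases h2 : c = ch
        · subst h2; simp [hcP]
        · simp [hcP, h2]
    rw [hstep, ih (P ++ [ch]) s (List.Nodup.of_cons hnd)
        (fun h => hsp (List.mem_cons_of_mem _ h))
        (fun c hc => by
          intro hmem
          rcases List.mem_append.mp hmem with h1 | h1
          · exact hP c (List.mem_cons_of_mem _ hc) h1
          · have : c = ch := by simpa using h1
            exact (List.nodup_cons.mp hnd).1 (this ▸ hc))]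
    simp

-- B's expansion equals A's transformed sentence
theorem pv_transform_eq (s : List Char) :
    pvPunct.foldl (fun t ch =>
        let idx := PySem.Chars.find t [ch]
        if idx ≠ -1 then PySem.Chars.replace t [ch] [' ', ch] else t) s
      = s.flatMap (fun ch => if pvPunctSet.contains ch then [' ', ch] else [ch]) := by
  have h1 : pvPunctSet = pvPunct := by decide
  have h2 := pv_fold_expand pvPunct [] s (by decide) (by decide) (by simp)
  rw [pv_expand_nil] at h2
  rw [h2, h1]
  simp [pvExpand]

-- the token-assignment dict as dedup + enumerate
def pvMkItems (u : List String) : List (String × Int) :=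
  (PySem.List.enumerate u).map (fun p => (p.2, p.1 + 1))

theorem pv_contains_mkItems (u : List String) (w : String) :
    (PySem.Dict.mk (pvMkItems u)).contains w = u.contains w := by
  induction u using List.reverseRecOn with
  | nil => simp [PySem.Dict.contains, pvMkItems, PySem.List.enumerate]
  | append_singleton rest x ih =>
    simp only [PySem.Dict.contains, pvMkItems, PySem.List.enumerate_append, List.map_append,
      List.any_append] at *
    simp [PySem.List.enumerate, ih]
    cases eq_or_ne x w with
    | inl h => subst h; simp
    | inr h => simp [h, Ne.symm h]

theorem pv_dict_fold (ws : List String) :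
    ∀ (u : List String),
      ws.foldl (fun (st : PySem.Dict String Int × Int) w =>
          if st.1.contains w then st else (st.1.insert w st.2, st.2 + 1))
        (PySem.Dict.mk (pvMkItems u), (u.length : Int) + 1)
      = (PySem.Dict.mk (pvMkItems (ws.foldl PySem.Set.add u)),
         ((ws.foldl PySem.Set.add u).length : Int) + 1) := by
  induction ws with
  | nil => intro u; simp
  | cons w rest ih =>
    intro u
    simp only [List.foldl_cons]
    by_cases h : u.contains w = true
    · have hc : (PySem.Dict.mk (pvMkItems u)).contains w = true := by
        rw [pv_contains_mkItems]; exact h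
      have hm : w ∈ u := by simpa using h
      have hadd : PySem.Set.add u w = u := by simp [PySem.Set.add, hm]
      rw [if_pos hc, hadd]
      exact ih u
    · have hc : (PySem.Dict.mk (pvMkItems u)).contains w = false := by
        rw [pv_contains_mkItems]; exact eq_false_of_ne_true h
      have hins : (PySem.Dict.mk (pvMkItems u)).insert w ((u.length : Int) + 1)
          = PySem.Dict.mk (pvMkItems (u ++ [w])) := by
        simp only [PySem.Dict.insert, hc, Bool.false_eq_true, if_neg, not_false_iff]
        congr 1
        simp [pvMkItems, PySem.List.enumerate_append, PySem.List.enumerate]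
      have hm : w ∉ u := by simpa using h
      have hadd : PySem.Set.add u w = u ++ [w] := by simp [PySem.Set.add, hm]
      rw [if_neg (by simp [hc]), hins, hadd,
          show ((u.length : Int) + 1 + 1) = (((u ++ [w]).length : Int) + 1) from by simp]
      exact ih (u ++ [w])

theorem pv_dict_fold_nil (ws : List String) :
    ws.foldl (fun (st : PySem.Dict String Int × Int) w =>
        if st.1.contains w then st else (st.1.insert w st.2, st.2 + 1))
      (PySem.Dict.empty, 1)
      = (PySem.Dict.mk (pvMkItems (PySem.List.dedup ws)),
         ((PySem.List.dedup ws).length : Int) + 1) := by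
  have h := pv_dict_fold ws []
  simpa [PySem.Dict.empty, pvMkItems, PySem.List.enumerate_nil, PySem.List.dedup,
    PySem.Set.ofList, PySem.Set.empty] using h

-- ===== VERDICT (by name: the statement is the Claim_ definition above) =====
theorem tokenizer_fit_spec : Claim_equal_tokenizer_fit := by
  intro sentences vocabulary _
  show tokenizer_fit sentences vocabulary = tokenizer_fit_alt sentences vocabulary
  simp only [tokenizer_fit, tokenizer_fit_alt]
  rw [PySem.List.foldl_pyRange_zero_pyGetD sentences ""
      (fun (st : PySem.Dict String Int × Int) (s : String) =>
        ((PySem.Chars.splitOn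
            (pvPunct.foldl (fun t ch =>
                let idx := PySem.Chars.find t [ch]
                if idx ≠ -1 then PySem.Chars.replace t [ch] [' ', ch] else t) s.toList)
            [' ']).map String.mk).foldl
          (fun (st : PySem.Dict String Int × Int) w =>
            if st.1.contains w then st else (st.1.insert w st.2, st.2 + 1)) st)
      (PySem.Dict.empty, 1)]
  rw [PySem.List.foldl_append_eq_flatMap, List.nil_append]
  rw [PySem.List.foldl_congr_mem sentences _
      (fun (st : PySem.Dict String Int × Int) (s : String) =>
        ((PySem.Chars.splitOn
            (s.toList.flatMap (fun ch => if pvPunctSet.contains ch then [' ', ch] else [ch]))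
            [' ']).map String.mk).foldl
          (fun (st : PySem.Dict String Int × Int) w =>
            if st.1.contains w then st else (st.1.insert w st.2, st.2 + 1)) st)
      (PySem.Dict.empty, 1)
      (fun st s _ => by rw [pv_transform_eq])]
  rw [← List.foldl_flatMap]
  rw [pv_dict_fold_nil]
  simp [pvMkItems]
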